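-- pv_equiv track=rewrite | github.com/A-Saji/Cis-motif-analysis | c4_motif_conservation_analysis.py | check_species_presence
-- ===== SOURCE A (Python) =====
-- def check_species_presence(sequence_ids, required_species):
--     """
--     Check if all required C4 species are represented in the sequence list.
--
--     Args:
--         sequence_ids: List of sequence identifiers
--         required_species: List of species prefixes to check for
--
--     Returns:
--         tuple: (bool: all species present, dict: species presence)
--     """
--     species_present = {species: False for species in required_species}
--
--     for seq_id in sequence_ids:
--         for species in required_species:
--             if seq_id.startswith(species):
--                 species_present[species] = True
--
--     all_present = all(species_present.values())
--
--     return all_present, species_present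
-- ===== SOURCE B (Python) =====
-- def check_species_presence(sequence_ids, required_species):
--     # Build the set of ALL prefixes of all sequence ids once, then each
--     # species check is a single O(1) set lookup (no per-species rescan).
--     prefixes = set()
--     for seq_id in sequence_ids:
--         for i in range(len(seq_id) + 1):
--             prefixes.add(seq_id[:i])
--     species_present = {}
--     for species in required_species:
--         species_present[species] = species in prefixes
--     all_present = all(species_present.values())
--     return all_present, species_present
-- ===== Notes on version B (the rewrite author's own statement) =====
-- stated objective: faster
-- what changed: Instead of testing every (sequence_id, species) pair with startswith, B builds the set of all prefixes of all sequence ids once and decides each species by a single set-membership lookup.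
import Mathlib
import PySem

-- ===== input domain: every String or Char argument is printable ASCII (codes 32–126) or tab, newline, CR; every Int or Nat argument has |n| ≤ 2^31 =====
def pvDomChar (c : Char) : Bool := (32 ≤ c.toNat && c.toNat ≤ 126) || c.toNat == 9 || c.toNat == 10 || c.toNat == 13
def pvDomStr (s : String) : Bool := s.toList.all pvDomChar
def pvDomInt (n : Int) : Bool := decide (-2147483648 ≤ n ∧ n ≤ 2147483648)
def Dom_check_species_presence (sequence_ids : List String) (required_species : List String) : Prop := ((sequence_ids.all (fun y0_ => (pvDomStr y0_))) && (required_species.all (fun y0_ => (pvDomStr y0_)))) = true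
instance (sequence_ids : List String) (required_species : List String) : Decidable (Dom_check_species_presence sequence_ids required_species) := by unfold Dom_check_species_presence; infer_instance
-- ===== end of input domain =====

-- B replaces A's per-(id, species) startswith scan by one set of all prefixes of all ids,
-- turning each species check into a single set lookup (objective: faster).

-- ===== PORT A =====
def check_species_presence (sequence_ids : List String) (required_species : List String) : Bool × (List (String × Bool)) :=
  let species_present0 : PySem.Dict String Bool :=
    required_species.foldl (fun d species => d.insert species false) PySem.Dict.empty
  let species_present :=
    sequence_ids.foldl (fun d seq_id =>
      required_species.foldl (fun d species =>
        if PySem.Str.startswith seq_id species then d.insert species true else d) d) species_present0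
  let all_present := species_present.values.all (fun b => b)
  (all_present, species_present.items)

-- ===== PORT B =====
def check_species_presence_alt (sequence_ids : List String) (required_species : List String) : Bool × (List (String × Bool)) :=
  let prefixes : PySem.Set String :=
    sequence_ids.foldl (fun ps seq_id =>
      (PySem.List.pyRange 0 (PySem.Str.len seq_id + 1) 1).foldl
        (fun ps i => ps.add (PySem.Str.slice seq_id none (some i))) ps) PySem.Set.empty
  let species_present : PySem.Dict String Bool :=
    required_species.foldl (fun d species => d.insert species (prefixes.contains species)) PySem.Dict.empty
  let all_present := species_present.values.all (fun b => b)
  (all_present, species_present.items)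

-- ===== PRECONDITION & SPEC =====
def Spec_check_species_presence (sequence_ids : List String) (required_species : List String) (out : Bool × (List (String × Bool))) : Prop := out = check_species_presence_alt sequence_ids required_species
instance (sequence_ids : List String) (required_species : List String) (out : Bool × (List (String × Bool))) : Decidable (Spec_check_species_presence sequence_ids required_species out) := by unfold Spec_check_species_presence; infer_instance

-- ===== CLAIM (what is proved, stated in full; the proofs are below) =====
def Claim_equal_check_species_presence : Prop := ∀ (sequence_ids : List String) (required_species : List String), Dom_check_species_presence sequence_ids required_species → Spec_check_species_presence sequence_ids required_species (check_species_presence sequence_ids required_species)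

-- ===== LEMMAS AND PROOFS =====

-- value of B's dict-building fold (the inserted value depends only on the key)
theorem getD_foldl_insert_fun (g : String → Bool) (sp : List String) (d : PySem.Dict String Bool) (x : String) :
    (sp.foldl (fun d s => d.insert s (g s)) d).getD x false
      = if x ∈ sp then g x else d.getD x false := by
  induction sp generalizing d with
  | nil => simp
  | cons s sp ih =>
      simp only [List.foldl_cons, ih, PySem.Dict.getD_insert, List.mem_cons]
      by_cases hx : x ∈ sp <;> by_cases hxs : x = s <;> simp [hx, hxs]

-- value after A's inner loop over required_species for one seq_id
theorem getD_inner_A (seq : String) (sp : List String) (d : PySem.Dict String Bool) (x : String) :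
    (sp.foldl (fun d s => if PySem.Str.startswith seq s then d.insert s true else d) d).getD x false
      = (d.getD x false || (decide (x ∈ sp) && PySem.Str.startswith seq x)) := by
  induction sp generalizing d with
  | nil => simp
  | cons s sp ih =>
      simp only [List.foldl_cons, ih, List.mem_cons]
      by_cases hxs : x = s
      · subst hxs
        cases hsw : PySem.Str.startswith seq x
        · simp
        · simp only [if_true, PySem.Dict.getD_insert]
          cases d.getD x false <;> simp
      · cases hsw : PySem.Str.startswith seq s <;>
          simp [PySem.Dict.getD_insert, hxs]

-- A's inner loop only overwrites keys already present, so the key list is unchanged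
theorem keys_inner_A (seq : String) (sp : List String) (d : PySem.Dict String Bool)
    (h : ∀ s ∈ sp, d.contains s = true) :
    (sp.foldl (fun d s => if PySem.Str.startswith seq s then d.insert s true else d) d).keys = d.keys := by
  induction sp generalizing d with
  | nil => simp
  | cons s sp ih =>
      simp only [List.foldl_cons]
      by_cases hsw : PySem.Str.startswith seq s
      · simp only [hsw, if_true]
        have hk : (d.insert s true).keys = d.keys :=
          PySem.Dict.keys_insert_of_contains d true (h s (List.mem_cons_self ..))
        rw [ih (d.insert s true) ?_, hk]
        intro s' hs'
        rw [PySem.Dict.contains_iff_mem_keys, hk, ← PySem.Dict.contains_iff_mem_keys]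
        exact h s' (List.mem_cons_of_mem _ hs')
      · simp only [hsw, Bool.false_eq_true, if_false]
        exact ih d (fun s' hs' => h s' (List.mem_cons_of_mem _ hs'))

-- A's outer loop preserves the key list
theorem keys_outer_A (sp : List String) (ids : List String) (d : PySem.Dict String Bool)
    (h : ∀ s ∈ sp, d.contains s = true) :
    (ids.foldl (fun d seq =>
        sp.foldl (fun d s => if PySem.Str.startswith seq s then d.insert s true else d) d) d).keys = d.keys := by
  induction ids generalizing d with
  | nil => simp
  | cons seq ids ih =>
      simp only [List.foldl_cons]
      have hk := keys_inner_A seq sp d h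
      rw [ih _ ?_, hk]
      intro s hs
      rw [PySem.Dict.contains_iff_mem_keys, hk, ← PySem.Dict.contains_iff_mem_keys]
      exact h s hs

-- value after A's outer loop
theorem getD_outer_A (sp : List String) (ids : List String) (d : PySem.Dict String Bool) (x : String) :
    (ids.foldl (fun d seq =>
        sp.foldl (fun d s => if PySem.Str.startswith seq s then d.insert s true else d) d) d).getD x false
      = (d.getD x false || (decide (x ∈ sp) && ids.any (fun seq => PySem.Str.startswith seq x))) := by
  induction ids generalizing d with
  | nil => simp
  | cons seq ids ih =>
      simp only [List.foldl_cons, ih, getD_inner_A, List.any_cons]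
      cases d.getD x false <;> cases hx : decide (x ∈ sp) <;>
        cases PySem.Str.startswith seq x <;> simp

-- membership in B's prefix set
theorem mem_prefixes (ids : List String) (ps : PySem.Set String) (y : String) :
    y ∈ ids.foldl (fun ps seq =>
        (PySem.List.pyRange 0 (PySem.Str.len seq + 1) 1).foldl
          (fun ps i => ps.add (PySem.Str.slice seq none (some i))) ps) ps
      ↔ y ∈ ps ∨ ∃ seq ∈ ids, PySem.Str.startswith seq y = true := by
  induction ids generalizing ps with
  | nil => simp
  | cons seq ids ih =>
      simp only [List.foldl_cons, ih, PySem.Set.mem_foldl_add, List.mem_cons]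
      constructor
      · rintro (⟨hy | ⟨i, hi, rfl⟩⟩ | ⟨s, hs, h⟩)
        · exact Or.inl hy
        · refine Or.inr ⟨seq, Or.inl rfl, ?_⟩
          rw [PySem.List.mem_pyRange_one] at hi
          rw [PySem.Str.startswith_eq, PySem.Chars.startswith_iff, PySem.Str.toList_slice,
            PySem.Chars.slice_eq_listSlice, PySem.List.slice_to _ hi.1]
          exact List.take_prefix _ _
        · exact Or.inr ⟨s, Or.inr hs, h⟩
      · rintro (hy | ⟨s, hs | hs, h⟩)
        · exact Or.inl (Or.inl hy)
        · subst hs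
          refine Or.inl (Or.inr ⟨(y.toList.length : Int), ?_, ?_⟩)
          · rw [PySem.List.mem_pyRange_one]
            rw [PySem.Str.startswith_eq, PySem.Chars.startswith_iff] at h
            have := h.length_le
            refine ⟨Int.natCast_nonneg _, ?_⟩
            rw [PySem.Str.len_eq]; omega
          · rw [PySem.Str.startswith_eq, PySem.Chars.startswith_iff] at h
            rw [String.ext_iff, PySem.Str.toList_slice, PySem.Chars.slice_eq_listSlice,
              PySem.List.slice_to _ (Int.natCast_nonneg _), Int.toNat_natCast]
            exact (List.prefix_iff_eq_take.mp h)
        · exact Or.inr ⟨s, hs, h⟩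

-- the two dicts are equal
theorem dict_eq (ids sp : List String) :
    (ids.foldl (fun d seq =>
        sp.foldl (fun d s => if PySem.Str.startswith seq s then d.insert s true else d) d)
      (sp.foldl (fun d s => d.insert s false) PySem.Dict.empty))
    = sp.foldl (fun d s => d.insert s
        (PySem.Set.contains (ids.foldl (fun ps seq =>
          (PySem.List.pyRange 0 (PySem.Str.len seq + 1) 1).foldl
            (fun ps i => ps.add (PySem.Str.slice seq none (some i))) ps) PySem.Set.empty) s))
      PySem.Dict.empty := by
  set prefixes := ids.foldl (fun ps seq =>
      (PySem.List.pyRange 0 (PySem.Str.len seq + 1) 1).foldl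
        (fun ps i => ps.add (PySem.Str.slice seq none (some i))) ps) PySem.Set.empty with hpre
  set d0 : PySem.Dict String Bool := sp.foldl (fun d s => d.insert s false) PySem.Dict.empty with hd0
  have hkeys0 : d0.keys = PySem.Set.ofList sp := by
    rw [hd0, PySem.Dict.keys_foldl_insert sp (fun _ _ => false) PySem.Dict.empty,
      PySem.Dict.keys_empty]
    exact PySem.Set.update_empty sp
  have hc0 : ∀ s ∈ sp, d0.contains s = true := by
    intro s hs
    rw [PySem.Dict.contains_iff_mem_keys, hkeys0, PySem.Set.mem_ofList]
    exact hs
  have hkeysA : (ids.foldl (fun d seq =>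
      sp.foldl (fun d s => if PySem.Str.startswith seq s then d.insert s true else d) d) d0).keys
      = PySem.Set.ofList sp := by rw [keys_outer_A sp ids d0 hc0, hkeys0]
  have hkeysB : (sp.foldl (fun d s => d.insert s (PySem.Set.contains prefixes s)) PySem.Dict.empty).keys
      = PySem.Set.ofList sp := by
    rw [PySem.Dict.keys_foldl_insert sp (fun _ s => PySem.Set.contains prefixes s) PySem.Dict.empty,
      PySem.Dict.keys_empty]
    exact PySem.Set.update_empty sp
  apply PySem.Dict.ext
  rw [PySem.Dict.items_eq_map_keys _ (hkeysA ▸ PySem.Set.nodup_ofList sp) false,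
    PySem.Dict.items_eq_map_keys _ (hkeysB ▸ PySem.Set.nodup_ofList sp) false, hkeysA, hkeysB]
  apply List.map_congr_left
  intro s hsmem
  have hs : s ∈ sp := (PySem.Set.mem_ofList sp s).mp hsmem
  have hmain : (ids.any fun seq => PySem.Str.startswith seq s) = prefixes.contains s := by
    rw [Bool.eq_iff_iff, List.any_eq_true, PySem.Set.contains_iff, hpre, mem_prefixes]
    simp [PySem.Set.empty]
  simp only [Prod.mk.injEq, true_and]
  rw [getD_outer_A sp ids d0 s, hd0,
    getD_foldl_insert_fun (fun _ => false) sp PySem.Dict.empty s,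
    getD_foldl_insert_fun (fun x => prefixes.contains x) sp PySem.Dict.empty s,
    if_pos hs, if_pos hs]
  simp only [hs, decide_true, Bool.true_and, Bool.false_or]
  exact hmain

-- ===== VERDICT (by name: the statement is the Claim_ definition above) =====
theorem check_species_presence_spec : Claim_equal_check_species_presence := by
  intro ids sp _
  show check_species_presence ids sp = check_species_presence_alt ids sp
  simp only [check_species_presence, check_species_presence_alt]
  rw [dict_eq ids sp]
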